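-- pv_equiv track=rewrite | github.com/Francisco0304/TalleresLenguajesFormales | Ejercicio1.py | verificar_afn
-- ===== SOURCE A (Python) =====
-- def verificar_afn(cadena):
--     # Conjunto de estados posibles
--     estados = {0}  # q0 = inicio
--     contiene_digito = False  # Para saber si hay al menos un dígito
--
--     for char in cadena:
--         nuevos_estados = set()
--         for estado in estados:
--             if estado == 0:  # q0: primer carácter
--                 if char.isupper():  # Letra mayúscula
--                     nuevos_estados.add(1)  # Ir a q1
--             elif estado == 1:  # q1: parte intermedia
--                 if char.islower():  # Letra minúscula
--                     nuevos_estados.add(1)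
--                 elif char.isdigit():  # Dígito
--                     nuevos_estados.add(1)
--                     contiene_digito = True
--         if not nuevos_estados:
--             return False, "La contraseña no cumple el formato (primer carácter o parte intermedia inválida)."
--         estados = nuevos_estados
--
--     # La contraseña es aceptada si termina en q1 y contiene al menos un dígito
--     if 1 in estados and contiene_digito:
--         return True, "Contraseña válida."
--     else:
--         return False, "La contraseña debe contener al menos un dígito."
-- ===== SOURCE B (Python) =====
-- def verificar_afn(cadena):
--     fmt = "La contraseña no cumple el formato (primer carácter o parte intermedia inválida)."
--     dig = "La contraseña debe contener al menos un dígito."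
--     if not cadena:
--         return False, dig
--     if not cadena[0].isupper():
--         return False, fmt
--     tiene_digito = False
--     for char in cadena[1:]:
--         if not (char.islower() or char.isdigit()):
--             return False, fmt
--         if char.isdigit():
--             tiene_digito = True
--     if tiene_digito:
--         return True, "Contraseña válida."
--     return False, dig
-- ===== Notes on version B (the rewrite author's own statement) =====
-- stated objective: simpler
-- what changed: Replaced the NFA set-of-states simulation (building a new state set per character) with a direct single-pass validator: check the first character, scan the rest with a digit flag, no state sets at all.
import Mathlib
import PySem

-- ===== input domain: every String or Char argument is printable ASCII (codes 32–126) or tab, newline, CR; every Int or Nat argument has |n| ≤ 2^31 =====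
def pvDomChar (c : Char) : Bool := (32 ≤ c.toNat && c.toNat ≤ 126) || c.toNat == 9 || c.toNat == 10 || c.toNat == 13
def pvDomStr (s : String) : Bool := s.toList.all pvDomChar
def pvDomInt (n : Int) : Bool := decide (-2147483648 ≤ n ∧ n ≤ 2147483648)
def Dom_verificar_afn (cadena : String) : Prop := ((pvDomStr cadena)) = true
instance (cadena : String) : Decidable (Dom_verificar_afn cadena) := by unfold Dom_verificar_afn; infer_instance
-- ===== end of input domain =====

-- B replaces A's NFA set-of-states simulation by a direct first-char check plus one scan with a digit flag (objective: simpler).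

-- ===== PORT A =====
-- inner 'for estado in estados' body (state = (nuevos_estados, contiene_digito))
def pvPasoA (c : Char) (p : PySem.Set Int × Bool) (estado : Int) : PySem.Set Int × Bool :=
  if estado = 0 then
    if PySem.Chars.isupper c then (PySem.Set.add p.1 1, p.2) else p
  else if estado = 1 then
    if PySem.Chars.islower c then (PySem.Set.add p.1 1, p.2)
    else if PySem.Chars.isdigit c then (PySem.Set.add p.1 1, true)
    else p
  else p

-- outer 'for char in cadena' loop with early return
def pvLoopA : List Char → PySem.Set Int → Bool → Bool × String
  | [], estados, contiene_digito =>
    if PySem.Set.contains estados 1 && contiene_digito then (true, "Contraseña válida.")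
    else (false, "La contraseña debe contener al menos un dígito.")
  | c :: rest, estados, contiene_digito =>
    let r := estados.foldl (pvPasoA c) (PySem.Set.empty, contiene_digito)
    if r.1 = [] then
      (false, "La contraseña no cumple el formato (primer carácter o parte intermedia inválida).")
    else pvLoopA rest r.1 r.2

def verificar_afn (cadena : String) : Bool × String :=
  pvLoopA cadena.toList (PySem.Set.ofList [0]) false

-- ===== PORT B =====
-- scan of cadena[1:] with the digit flag
def pvLoopB : List Char → Bool → Bool × String
  | [], tiene_digito =>
    if tiene_digito then (true, "Contraseña válida.")
    else (false, "La contraseña debe contener al menos un dígito.")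
  | c :: rest, tiene_digito =>
    if !(PySem.Chars.islower c || PySem.Chars.isdigit c) then
      (false, "La contraseña no cumple el formato (primer carácter o parte intermedia inválida).")
    else pvLoopB rest (tiene_digito || PySem.Chars.isdigit c)

def verificar_afn_alt (cadena : String) : Bool × String :=
  match cadena.toList with
  | [] => (false, "La contraseña debe contener al menos un dígito.")
  | c :: rest =>
    if !PySem.Chars.isupper c then
      (false, "La contraseña no cumple el formato (primer carácter o parte intermedia inválida).")
    else pvLoopB rest false

-- ===== PRECONDITION & SPEC =====
def Spec_verificar_afn (cadena : String) (out : Bool × String) : Prop := out = verificar_afn_alt cadena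
instance (cadena : String) (out : Bool × String) : Decidable (Spec_verificar_afn cadena out) := by unfold Spec_verificar_afn; infer_instance

-- ===== CLAIM (what is proved, stated in full; the proofs are below) =====
def Claim_equal_verificar_afn : Prop := ∀ (cadena : String), Dom_verificar_afn cadena → Spec_verificar_afn cadena (verificar_afn cadena)

-- ===== LEMMAS AND PROOFS =====

-- a lower-case letter is never a digit (both predicates are Python's ASCII ranges)
theorem pv_islower_not_isdigit (c : Char) :
    PySem.Chars.islower c = true → PySem.Chars.isdigit c = false := by
  simp only [PySem.Chars.islower, PySem.Chars.isdigit, Char.le_def, UInt32.le_iff_toNat_le,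
    Bool.and_eq_true, decide_eq_true_eq, Bool.and_eq_false_iff, decide_eq_false_iff_not,
    show ('a'.val.toNat = 97) from rfl, show ('z'.val.toNat = 122) from rfl,
    show ('0'.val.toNat = 48) from rfl, show ('9'.val.toNat = 57) from rfl]
  intro h
  right
  omega

-- once A's state set is {1}, A's loop computes exactly B's scan
theorem pvLoopA_one (rest : List Char) : ∀ cd, pvLoopA rest [(1 : Int)] cd = pvLoopB rest cd := by
  induction rest with
  | nil => intro cd; rfl
  | cons c rest ih =>
    intro cd
    by_cases hl : PySem.Chars.islower c = true
    · have hd := pv_islower_not_isdigit c hl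
      simp [pvLoopA, pvLoopB, pvPasoA, hl, hd, PySem.Set.add, PySem.Set.empty, ih]
    · by_cases hdg : PySem.Chars.isdigit c = true
      · simp [pvLoopA, pvLoopB, pvPasoA, hl, hdg, PySem.Set.add, PySem.Set.empty, ih]
      · simp [pvLoopA, pvLoopB, pvPasoA, hl, hdg, PySem.Set.empty]

-- ===== VERDICT (by name: the statement is the Claim_ definition above) =====
theorem verificar_afn_spec : Claim_equal_verificar_afn := by
  intro cadena _
  unfold Spec_verificar_afn verificar_afn verificar_afn_alt
  cases h : cadena.toList with
  | nil => rfl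
  | cons c rest =>
    by_cases hu : PySem.Chars.isupper c = true
    · simp [pvLoopA, pvPasoA, hu, PySem.Set.ofList, PySem.Set.add, PySem.Set.empty,
        PySem.Set.contains, pvLoopA_one]
    · simp [pvLoopA, pvPasoA, hu, PySem.Set.ofList, PySem.Set.empty]
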